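-- pv_equiv track=rewrite | github.com/zzt-chun/MyProject | Util/dataanalyze.py | change_dic_by_name
-- ===== SOURCE A (Python) =====
-- def change_dic(dic):
--     '''
--     将包含字典的集合转化成包含集合的集合
--     '''
--     buf = []
--     if len(dic) == 0:
--         return dic
--     buf.append(list(dic[0].keys()))
--     for each in dic:
--         buf.append(list(each.values()))
--     return buf
--
-- def change_dic_by_name(dic):
--     dic = change_dic(dic)
--     _dic = list()
--     for _ in dic:
--         if _[0] == "column_name":
--             continue
--         _dic.append(_[0])
--     return [_dic]
-- ===== SOURCE B (Python) =====
-- def change_dic_by_name(dic):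
--     if len(dic) == 0:
--         return [[]]
--     res = []
--     k = list(dic[0].keys())[0]
--     if k != "column_name":
--         res.append(k)
--     for each in dic:
--         v = list(each.values())[0]
--         if v != "column_name":
--             res.append(v)
--     return [res]
-- ===== Notes on version B (the rewrite author's own statement) =====
-- stated objective: simpler
-- what changed: Inlines change_dic and drops the intermediate buf table of full key/value lists: B takes the first key of dic[0] and the first value of each dict directly in one pass, appending unless the item is 'column_name'.
import Mathlib
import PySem

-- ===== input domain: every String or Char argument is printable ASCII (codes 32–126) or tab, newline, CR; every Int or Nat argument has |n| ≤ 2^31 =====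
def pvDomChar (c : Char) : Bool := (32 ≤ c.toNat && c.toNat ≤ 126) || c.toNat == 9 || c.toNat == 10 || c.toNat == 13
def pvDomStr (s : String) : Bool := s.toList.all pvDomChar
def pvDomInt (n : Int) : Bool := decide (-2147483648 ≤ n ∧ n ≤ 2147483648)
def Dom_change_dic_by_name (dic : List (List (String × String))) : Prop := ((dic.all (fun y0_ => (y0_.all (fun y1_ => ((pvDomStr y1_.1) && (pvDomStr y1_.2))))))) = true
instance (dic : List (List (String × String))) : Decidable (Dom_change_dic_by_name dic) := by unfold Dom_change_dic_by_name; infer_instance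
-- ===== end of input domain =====

-- ===== PORT A =====
-- B inlines change_dic and fuses its two passes into one, never building the buf table; return value only.
def pvChangeDic (dic : List (List (String × String))) : List (List String) :=
  match dic with
  | [] => []
  | d0 :: _ =>
    -- buf = [list(dic[0].keys())]; for each in dic: buf.append(list(each.values()))
    dic.foldl (fun buf each => buf ++ [each.map Prod.snd]) [d0.map Prod.fst]

def change_dic_by_name (dic : List (List (String × String))) : List (List String) :=
  let dic2 := pvChangeDic dic
  -- for _ in dic2: if _[0] == "column_name": continue; _dic.append(_[0])
  [dic2.foldl (fun acc row =>
      if PySem.List.pyGetD row 0 "" == "column_name" then acc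
      else acc ++ [PySem.List.pyGetD row 0 ""]) []]

-- ===== PORT B =====
def change_dic_by_name_alt (dic : List (List (String × String))) : List (List String) :=
  match dic with
  | [] => [[]]
  | d0 :: _ =>
    let k := PySem.List.pyGetD (d0.map Prod.fst) 0 ""
    let res0 := if k != "column_name" then [k] else []
    [dic.foldl (fun acc each =>
        let v := PySem.List.pyGetD (each.map Prod.snd) 0 ""
        if v != "column_name" then acc ++ [v] else acc) res0]

-- ===== PRECONDITION & SPEC =====
-- Pre_ excludes (i) nonempty inputs containing an empty dict, on which A (and B) raise IndexError, and
-- (ii) association lists with duplicate keys inside one dict, which do not represent any Python dict value.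
def Pre_change_dic_by_name (dic : List (List (String × String))) : Prop :=
  (∀ d ∈ dic, d ≠ [] ∧ (d.map Prod.fst).Nodup)
instance (dic : List (List (String × String))) : Decidable (Pre_change_dic_by_name dic) := by
  unfold Pre_change_dic_by_name; infer_instance

def pvWitness_change_dic_by_name : (List (List (String × String))) :=
  [[("column_name", "c1")], [("a", "1"), ("b", "2")]]

def Spec_change_dic_by_name (dic : List (List (String × String))) (out : List (List String)) : Prop := out = change_dic_by_name_alt dic
instance (dic : List (List (String × String))) (out : List (List String)) : Decidable (Spec_change_dic_by_name dic out) := by unfold Spec_change_dic_by_name; infer_instance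

-- ===== CLAIM (what is proved, stated in full; the proofs are below) =====
def Claim_equal_change_dic_by_name : Prop := ∀ (dic : List (List (String × String))), Dom_change_dic_by_name dic → Pre_change_dic_by_name dic → Spec_change_dic_by_name dic (change_dic_by_name dic)

-- ===== LEMMAS AND PROOFS =====

-- the two step functions agree pointwise (A tests == and skips; B tests != and appends)
theorem pv_step_eq (acc : List String) (v : String) :
    (if v == "column_name" then acc else acc ++ [v])
      = (if v != "column_name" then acc ++ [v] else acc) := by
  by_cases h : v = "column_name" <;> simp [h]

-- same, specialised to the empty accumulator (the first element of A's buf, the key row)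
theorem pv_step_eq0 (v : String) :
    (if v == "column_name" then ([] : List String) else [v])
      = (if v != "column_name" then [v] else []) := by
  by_cases h : v = "column_name" <;> simp [h]

theorem pv_equal : ∀ (dic : List (List (String × String))),
    change_dic_by_name dic = change_dic_by_name_alt dic := by
  intro dic
  cases dic with
  | nil => rfl
  | cons d0 rest =>
    simp only [change_dic_by_name, change_dic_by_name_alt, pvChangeDic,
      PySem.List.foldl_append_singleton_eq_map, List.cons_append,
      List.nil_append, List.foldl_cons, List.foldl_map]
    simp only [pv_step_eq, pv_step_eq0]

-- ===== VERDICT (by name: the statement is the Claim_ definition above) =====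
theorem change_dic_by_name_spec : Claim_equal_change_dic_by_name := by
  intro dic _ _
  unfold Spec_change_dic_by_name
  exact pv_equal dic
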